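-- pv_equiv track=rewrite | github.com/kvjanhun/web_kontissa | app/api/weather.py | _wawa_to_condition
-- ===== SOURCE A (Python) =====
-- WAWA_MAP = {
--     0: ("Clear", "Selkeä"),
--     (1, 3): ("Partly cloudy", "Puolipilvistä"),
--     (4, 5): ("Haze", "Utua"),
--     10: ("Mist", "Sumua"),
--     11: ("Diamond dust", "Timanttipölyä"),
--     12: ("Distant lightning", "Salamointia"),
--     18: ("Squalls", "Puuskia"),
--     20: ("Fog recently", "Sumua aiemmin"),
--     21: ("Precipitation recently", "Sadetta aiemmin"),
--     22: ("Drizzle recently", "Tihkua aiemmin"),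
--     23: ("Rain recently", "Sadetta aiemmin"),
--     24: ("Snow recently", "Lumisadetta aiemmin"),
--     25: ("Freezing rain recently", "Jäätävää sadetta aiemmin"),
--     26: ("Thunderstorm recently", "Ukkosta aiemmin"),
--     (27, 29): ("Blowing snow", "Tuiskua"),
--     (30, 35): ("Fog", "Sumua"),
--     (40, 49): ("Precipitation", "Sadetta"),
--     (50, 53): ("Drizzle", "Tihkusadetta"),
--     (54, 56): ("Freezing drizzle", "Jäätävää tihkua"),
--     (57, 58): ("Drizzle and rain", "Tihkua ja sadetta"),
--     60: ("Rain", "Sadetta"),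
--     (61, 63): ("Rain", "Sadetta"),
--     (64, 66): ("Freezing rain", "Jäätävää sadetta"),
--     (67, 68): ("Rain and snow", "Räntää"),
--     70: ("Snow", "Lumisadetta"),
--     (71, 73): ("Snow", "Lumisadetta"),
--     (74, 76): ("Ice pellets", "Jääjyväsiä"),
--     77: ("Snow grains", "Lumijyväsiä"),
--     78: ("Ice crystals", "Jääkiteitä"),
--     (80, 84): ("Rain showers", "Sadekuuroja"),
--     (85, 87): ("Snow showers", "Lumikuuroja"),
--     89: ("Hail", "Rakeita"),
--     (90, 96): ("Thunderstorm", "Ukkosta"),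
--     99: ("Tornado", "Tornado"),
-- }
--
-- def _wawa_to_condition(code):
--     if code is None:
--         return "N/A", "N/A"
--     code = int(code)
--     for key, val in WAWA_MAP.items():
--         if isinstance(key, int) and code == key:
--             return val
--         if isinstance(key, tuple) and key[0] <= code <= key[1]:
--             return val
--     return "N/A", "N/A"
-- ===== SOURCE B (Python) =====
-- # B: sorted disjoint half-open interval table + hand-written binary search
-- # (the WAWA intervals are disjoint and ascending, so first-match == only match).
-- _TABLE = [
--     (0, 1, ("Clear", "Selkeä")),
--     (1, 4, ("Partly cloudy", "Puolipilvistä")),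
--     (4, 6, ("Haze", "Utua")),
--     (10, 11, ("Mist", "Sumua")),
--     (11, 12, ("Diamond dust", "Timanttipölyä")),
--     (12, 13, ("Distant lightning", "Salamointia")),
--     (18, 19, ("Squalls", "Puuskia")),
--     (20, 21, ("Fog recently", "Sumua aiemmin")),
--     (21, 22, ("Precipitation recently", "Sadetta aiemmin")),
--     (22, 23, ("Drizzle recently", "Tihkua aiemmin")),
--     (23, 24, ("Rain recently", "Sadetta aiemmin")),
--     (24, 25, ("Snow recently", "Lumisadetta aiemmin")),
--     (25, 26, ("Freezing rain recently", "Jäätävää sadetta aiemmin")),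
--     (26, 27, ("Thunderstorm recently", "Ukkosta aiemmin")),
--     (27, 30, ("Blowing snow", "Tuiskua")),
--     (30, 36, ("Fog", "Sumua")),
--     (40, 50, ("Precipitation", "Sadetta")),
--     (50, 54, ("Drizzle", "Tihkusadetta")),
--     (54, 57, ("Freezing drizzle", "Jäätävää tihkua")),
--     (57, 59, ("Drizzle and rain", "Tihkua ja sadetta")),
--     (60, 64, ("Rain", "Sadetta")),
--     (64, 67, ("Freezing rain", "Jäätävää sadetta")),
--     (67, 69, ("Rain and snow", "Räntää")),
--     (70, 74, ("Snow", "Lumisadetta")),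
--     (74, 77, ("Ice pellets", "Jääjyväsiä")),
--     (77, 78, ("Snow grains", "Lumijyväsiä")),
--     (78, 79, ("Ice crystals", "Jääkiteitä")),
--     (80, 85, ("Rain showers", "Sadekuuroja")),
--     (85, 88, ("Snow showers", "Lumikuuroja")),
--     (89, 90, ("Hail", "Rakeita")),
--     (90, 97, ("Thunderstorm", "Ukkosta")),
--     (99, 100, ("Tornado", "Tornado")),
-- ]
--
--
-- def _wawa_to_condition(code):
--     if code is None:
--         return "N/A", "N/A"
--     c = int(code)
--     lo_i, hi_i = 0, len(_TABLE)
--     while lo_i < hi_i: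
--         mid = (lo_i + hi_i) // 2
--         lo, hi, val = _TABLE[mid]
--         if c < lo:
--             hi_i = mid
--         elif c >= hi:
--             lo_i = mid + 1
--         else:
--             return val
--     return "N/A", "N/A"
-- ===== Notes on version B (the rewrite author's own statement) =====
-- stated objective: alternative
-- what changed: A's per-call linear first-match scan over the mixed scalar/interval WAWA_MAP is replaced by a sorted disjoint half-open interval table queried with a hand-written binary search (correct because the intervals are disjoint and ascending, so first match equals only match).
import Mathlib
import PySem

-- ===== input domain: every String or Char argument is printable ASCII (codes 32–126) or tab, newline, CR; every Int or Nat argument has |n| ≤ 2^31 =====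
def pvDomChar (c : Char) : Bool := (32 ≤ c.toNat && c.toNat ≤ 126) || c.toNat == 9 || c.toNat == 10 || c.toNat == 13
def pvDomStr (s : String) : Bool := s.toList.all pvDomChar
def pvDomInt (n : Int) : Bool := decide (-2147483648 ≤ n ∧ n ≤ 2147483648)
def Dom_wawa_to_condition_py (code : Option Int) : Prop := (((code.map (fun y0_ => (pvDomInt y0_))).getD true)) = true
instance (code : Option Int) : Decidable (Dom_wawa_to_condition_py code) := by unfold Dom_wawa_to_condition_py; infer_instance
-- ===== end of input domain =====

set_option maxRecDepth 20000
set_option maxHeartbeats 1000000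

-- B replaces A's per-call first-match scan of the mixed scalar/interval WAWA_MAP by a
-- sorted half-open interval table searched by binary search; return-value equivalence only.

-- ===== PORT A =====
-- WAWA_MAP: a key is either a single code (Sum.inl) or an inclusive range (Sum.inr)
def wawaMap : List ((Int ⊕ (Int × Int)) × (String × String)) := [
  (Sum.inl 0, ("Clear", "Selkeä")),
  (Sum.inr (1, 3), ("Partly cloudy", "Puolipilvistä")),
  (Sum.inr (4, 5), ("Haze", "Utua")),
  (Sum.inl 10, ("Mist", "Sumua")),
  (Sum.inl 11, ("Diamond dust", "Timanttipölyä")),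
  (Sum.inl 12, ("Distant lightning", "Salamointia")),
  (Sum.inl 18, ("Squalls", "Puuskia")),
  (Sum.inl 20, ("Fog recently", "Sumua aiemmin")),
  (Sum.inl 21, ("Precipitation recently", "Sadetta aiemmin")),
  (Sum.inl 22, ("Drizzle recently", "Tihkua aiemmin")),
  (Sum.inl 23, ("Rain recently", "Sadetta aiemmin")),
  (Sum.inl 24, ("Snow recently", "Lumisadetta aiemmin")),
  (Sum.inl 25, ("Freezing rain recently", "Jäätävää sadetta aiemmin")),
  (Sum.inl 26, ("Thunderstorm recently", "Ukkosta aiemmin")),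
  (Sum.inr (27, 29), ("Blowing snow", "Tuiskua")),
  (Sum.inr (30, 35), ("Fog", "Sumua")),
  (Sum.inr (40, 49), ("Precipitation", "Sadetta")),
  (Sum.inr (50, 53), ("Drizzle", "Tihkusadetta")),
  (Sum.inr (54, 56), ("Freezing drizzle", "Jäätävää tihkua")),
  (Sum.inr (57, 58), ("Drizzle and rain", "Tihkua ja sadetta")),
  (Sum.inl 60, ("Rain", "Sadetta")),
  (Sum.inr (61, 63), ("Rain", "Sadetta")),
  (Sum.inr (64, 66), ("Freezing rain", "Jäätävää sadetta")),
  (Sum.inr (67, 68), ("Rain and snow", "Räntää")),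
  (Sum.inl 70, ("Snow", "Lumisadetta")),
  (Sum.inr (71, 73), ("Snow", "Lumisadetta")),
  (Sum.inr (74, 76), ("Ice pellets", "Jääjyväsiä")),
  (Sum.inl 77, ("Snow grains", "Lumijyväsiä")),
  (Sum.inl 78, ("Ice crystals", "Jääkiteitä")),
  (Sum.inr (80, 84), ("Rain showers", "Sadekuuroja")),
  (Sum.inr (85, 87), ("Snow showers", "Lumikuuroja")),
  (Sum.inl 89, ("Hail", "Rakeita")),
  (Sum.inr (90, 96), ("Thunderstorm", "Ukkosta")),
  (Sum.inl 99, ("Tornado", "Tornado"))]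

-- A's per-call loop over WAWA_MAP.items(): first matching key wins, else N/A
def wawaScan (code : Int) : List ((Int ⊕ (Int × Int)) × (String × String)) → String × String
  | [] => ("N/A", "N/A")
  | (key, val) :: rest =>
    match key with
    | Sum.inl k => if code = k then val else wawaScan code rest
    | Sum.inr (lo, hi) => if lo ≤ code ∧ code ≤ hi then val else wawaScan code rest

def wawa_to_condition_py (code : Option Int) : String × String :=
  match code with
  | none => ("N/A", "N/A")
  | some c => wawaScan c wawaMap

-- ===== PORT B =====
-- B's sorted table of half-open intervals [lo, hi)
def wawaTable : Array (Int × Int × String × String) := #[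
  (0, 1, "Clear", "Selkeä"),
  (1, 4, "Partly cloudy", "Puolipilvistä"),
  (4, 6, "Haze", "Utua"),
  (10, 11, "Mist", "Sumua"),
  (11, 12, "Diamond dust", "Timanttipölyä"),
  (12, 13, "Distant lightning", "Salamointia"),
  (18, 19, "Squalls", "Puuskia"),
  (20, 21, "Fog recently", "Sumua aiemmin"),
  (21, 22, "Precipitation recently", "Sadetta aiemmin"),
  (22, 23, "Drizzle recently", "Tihkua aiemmin"),
  (23, 24, "Rain recently", "Sadetta aiemmin"),
  (24, 25, "Snow recently", "Lumisadetta aiemmin"),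
  (25, 26, "Freezing rain recently", "Jäätävää sadetta aiemmin"),
  (26, 27, "Thunderstorm recently", "Ukkosta aiemmin"),
  (27, 30, "Blowing snow", "Tuiskua"),
  (30, 36, "Fog", "Sumua"),
  (40, 50, "Precipitation", "Sadetta"),
  (50, 54, "Drizzle", "Tihkusadetta"),
  (54, 57, "Freezing drizzle", "Jäätävää tihkua"),
  (57, 59, "Drizzle and rain", "Tihkua ja sadetta"),
  (60, 64, "Rain", "Sadetta"),
  (64, 67, "Freezing rain", "Jäätävää sadetta"),
  (67, 69, "Rain and snow", "Räntää"),
  (70, 74, "Snow", "Lumisadetta"),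
  (74, 77, "Ice pellets", "Jääjyväsiä"),
  (77, 78, "Snow grains", "Lumijyväsiä"),
  (78, 79, "Ice crystals", "Jääkiteitä"),
  (80, 85, "Rain showers", "Sadekuuroja"),
  (85, 88, "Snow showers", "Lumikuuroja"),
  (89, 90, "Hail", "Rakeita"),
  (90, 97, "Thunderstorm", "Ukkosta"),
  (99, 100, "Tornado", "Tornado")]

-- Source B's while loop, ported with a fuel parameter bounding the number of iterations;
-- fuel = wawaTable.size iterations always suffice, since each step shrinks hi_i - lo_i.
def wawaSearch (c : Int) : Nat → Nat → Nat → String × String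
  | 0, _, _ => ("N/A", "N/A")
  | fuel + 1, lo_i, hi_i =>
    if lo_i < hi_i then
      match wawaTable[(lo_i + hi_i) / 2]? with
      | none => ("N/A", "N/A")   -- unreachable: mid < size
      | some (lo, hi, val) =>
        if c < lo then wawaSearch c fuel lo_i ((lo_i + hi_i) / 2)
        else if hi ≤ c then wawaSearch c fuel ((lo_i + hi_i) / 2 + 1) hi_i
        else val
    else ("N/A", "N/A")

def wawa_to_condition_py_alt (code : Option Int) : String × String :=
  match code with
  | none => ("N/A", "N/A")
  | some c => wawaSearch c wawaTable.size 0 wawaTable.size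

-- ===== PRECONDITION & SPEC =====
def Spec_wawa_to_condition_py (code : Option Int) (out : String × String) : Prop := out = wawa_to_condition_py_alt code
instance (code : Option Int) (out : String × String) : Decidable (Spec_wawa_to_condition_py code out) := by unfold Spec_wawa_to_condition_py; infer_instance

-- ===== CLAIM =====
def Claim_equal_wawa_to_condition_py : Prop := ∀ (code : Option Int), Dom_wawa_to_condition_py code → Spec_wawa_to_condition_py code (wawa_to_condition_py code)

-- ===== LEMMAS AND PROOFS =====

-- a code n misses a key of WAWA_MAP
def keyMiss (n : Int) : (Int ⊕ (Int × Int)) → Prop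
  | Sum.inl k => ¬ n = k
  | Sum.inr (lo, hi) => ¬ (lo ≤ n ∧ n ≤ hi)

lemma scan_no_match (n : Int) (l : List ((Int ⊕ (Int × Int)) × (String × String)))
    (h : ∀ p ∈ l, keyMiss n p.1) : wawaScan n l = ("N/A", "N/A") := by
  induction l with
  | nil => rfl
  | cons p rest ih =>
    have hrest := fun q hq => h q (List.mem_cons_of_mem _ hq)
    obtain ⟨key, val⟩ := p
    have hk := h (key, val) List.mem_cons_self
    match key with
    | Sum.inl k =>
      simp only [keyMiss] at hk
      simp only [wawaScan]
      rw [if_neg hk]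
      exact ih hrest
    | Sum.inr (lo, hi) =>
      simp only [keyMiss] at hk
      simp only [wawaScan]
      rw [if_neg hk]
      exact ih hrest

def keyOk : (Int ⊕ (Int × Int)) → Bool
  | Sum.inl k => 0 ≤ k && k ≤ 99
  | Sum.inr (lo, hi) => 0 ≤ lo && hi ≤ 99

lemma wawaMap_key_bounds : ∀ p ∈ wawaMap, keyOk p.1 = true := by decide

lemma scan_out_of_range (n : Int) (h : n < 0 ∨ 99 < n) :
    wawaScan n wawaMap = ("N/A", "N/A") := by
  apply scan_no_match
  intro p hp
  have hb := wawaMap_key_bounds p hp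
  match hkey : p.1 with
  | Sum.inl k =>
    rw [hkey] at hb
    simp only [keyOk, Bool.and_eq_true, decide_eq_true_eq] at hb
    simp only [keyMiss]
    omega
  | Sum.inr (lo, hi) =>
    rw [hkey] at hb
    simp only [keyOk, Bool.and_eq_true, decide_eq_true_eq] at hb
    simp only [keyMiss]
    omega

-- every interval of the table lies within [0, 100)
lemma wawaTable_bounds : ∀ e ∈ wawaTable, 0 ≤ e.1 ∧ e.1 < e.2.1 ∧ e.2.1 ≤ 100 := by decide

lemma search_out_of_range (n : Int) (h : n < 0 ∨ 99 < n) :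
    ∀ (fuel lo_i hi_i : Nat), wawaSearch n fuel lo_i hi_i = ("N/A", "N/A") := by
  intro fuel
  induction fuel with
  | zero => intro _ _; rfl
  | succ f ih =>
    intro lo_i hi_i
    simp only [wawaSearch]
    split
    · cases hget : wawaTable[(lo_i + hi_i) / 2]? with
      | none => simp
      | some e =>
        obtain ⟨lo, hi, val⟩ := e
        have hmem : (lo, hi, val) ∈ wawaTable := by
          have := Array.getElem?_eq_some_iff.mp hget
          obtain ⟨hlt, heq⟩ := this
          exact heq ▸ Array.getElem_mem hlt
        have hb := wawaTable_bounds _ hmem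
        simp only at hb
        dsimp only
        rcases h with h | h
        · rw [if_pos (by omega)]
          exact ih _ _
        · rw [if_neg (by omega), if_pos (by omega)]
          exact ih _ _
    · rfl

lemma agree_in_range (n : Int) (h0 : 0 ≤ n) (h99 : n ≤ 99) :
    wawaScan n wawaMap = wawaSearch n wawaTable.size 0 wawaTable.size := by
  interval_cases n <;> decide

-- ===== VERDICT =====
theorem wawa_to_condition_py_spec : Claim_equal_wawa_to_condition_py := by
  intro code _
  unfold Spec_wawa_to_condition_py
  cases code with
  | none => rfl
  | some n =>
    show wawaScan n wawaMap = wawa_to_condition_py_alt (some n)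
    show wawaScan n wawaMap = wawaSearch n wawaTable.size 0 wawaTable.size
    by_cases h : 0 ≤ n ∧ n ≤ 99
    · exact agree_in_range n h.1 h.2
    · rw [scan_out_of_range n (by omega), search_out_of_range n (by omega)]
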